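-- pv_equiv track=rewrite | github.com/dunncw/king_cunningham_code | src/simplifile3/workflows/bea_hor_countys_deedback/workflow.py | group_multi_unit_contracts
-- ===== SOURCE A (Python) =====
-- from typing import Dict, List, Any, Tuple
--
-- def group_multi_unit_contracts(excel_data: List[Dict[str, Any]]) -> Dict[str, List[int]]:
--     """
--     Identify multi-unit contracts (same Project + Number)
--
--     Returns:
--         Dictionary mapping "project-number" to list of row indices
--     """
--     contract_groups = {}
--
--     for i, row in enumerate(excel_data):
--         project = row.get("Project", "")
--         number = row.get("Number", "")
--         contract_key = f"{project}-{number}"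
--
--         if contract_key not in contract_groups:
--             contract_groups[contract_key] = []
--         contract_groups[contract_key].append(i)
--
--     # Return only groups with multiple rows
--     return {k: v for k, v in contract_groups.items() if len(v) > 1}
-- ===== SOURCE B (Python) =====
-- def group_multi_unit_contracts(excel_data):
--     # First pass: count occurrences of each contract key.
--     counts = {}
--     for row in excel_data:
--         key = f"{row.get('Project', '')}-{row.get('Number', '')}"
--         counts[key] = counts.get(key, 0) + 1
--     # Second pass: collect indices only for keys that occur more than once.
--     result = {}
--     for i, row in enumerate(excel_data):
--         key = f"{row.get('Project', '')}-{row.get('Number', '')}"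
--         if counts[key] > 1:
--             result.setdefault(key, []).append(i)
--     return result
-- ===== Notes on version B (the rewrite author's own statement) =====
-- stated objective: alternative
-- what changed: Replaces group-everything-then-filter with a two-pass frequency count: a first pass counts each contract key, a second pass appends an index only when its key's count exceeds 1, so singleton groups are never built and no post-hoc filtering comprehension is needed.
import Mathlib
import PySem

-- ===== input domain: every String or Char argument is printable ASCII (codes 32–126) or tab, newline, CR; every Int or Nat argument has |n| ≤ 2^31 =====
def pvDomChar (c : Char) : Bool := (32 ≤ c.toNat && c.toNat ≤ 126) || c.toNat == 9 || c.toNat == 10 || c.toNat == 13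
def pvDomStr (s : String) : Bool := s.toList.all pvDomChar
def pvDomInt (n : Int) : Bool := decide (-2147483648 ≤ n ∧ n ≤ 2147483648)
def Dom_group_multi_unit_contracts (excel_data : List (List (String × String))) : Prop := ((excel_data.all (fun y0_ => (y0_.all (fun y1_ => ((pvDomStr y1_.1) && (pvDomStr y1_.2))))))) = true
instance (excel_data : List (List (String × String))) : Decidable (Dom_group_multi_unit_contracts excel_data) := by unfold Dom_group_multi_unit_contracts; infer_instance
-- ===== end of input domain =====

-- B replaces A's group-everything-then-filter by a two-pass key-frequency count (count keys first,
-- then append an index only when its key occurs more than once): an alternative decomposition, same cost.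

-- f"{row.get('Project','')}-{row.get('Number','')}" (row is a Python dict: first-match lookup)
def pvKey (row : List (String × String)) : String :=
  (PySem.Dict.mk row).getD "Project" "" ++ "-" ++ (PySem.Dict.mk row).getD "Number" ""

-- ===== PORT A =====
def group_multi_unit_contracts (excel_data : List (List (String × String))) : List (String × List Int) :=
  let contract_groups : PySem.Dict String (List Int) :=
    (PySem.List.enumerate excel_data).foldl
      (fun d p =>
        let contract_key := pvKey p.2
        let d := if d.contains contract_key then d else d.insert contract_key ([] : List Int)
        d.modify contract_key [] (fun v => v ++ [p.1]))   -- contract_groups[contract_key].append(i)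
      PySem.Dict.empty
  -- {k: v for k, v in contract_groups.items() if len(v) > 1}  (keys are distinct, so the dict
  -- comprehension is exactly the filtered items list)
  contract_groups.items.filter (fun kv => 1 < kv.2.length)

-- ===== PORT B =====
def group_multi_unit_contracts_alt (excel_data : List (List (String × String))) : List (String × List Int) :=
  let counts : PySem.Dict String Int :=
    excel_data.foldl (fun d row => d.modify (pvKey row) 0 (· + 1)) PySem.Dict.empty
  let result : PySem.Dict String (List Int) :=
    (PySem.List.enumerate excel_data).foldl
      (fun r p =>
        let key := pvKey p.2
        -- counts[key] never raises here: key was counted in the first pass, so getD is exact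
        if counts.getD key 0 > 1 then
          (r.setdefault key ([] : List Int)).modify key [] (fun v => v ++ [p.1])
        else r)
      PySem.Dict.empty
  result.items

-- ===== PRECONDITION & SPEC =====
def Spec_group_multi_unit_contracts (excel_data : List (List (String × String))) (out : List (String × List Int)) : Prop := out = group_multi_unit_contracts_alt excel_data
instance (excel_data : List (List (String × String))) (out : List (String × List Int)) : Decidable (Spec_group_multi_unit_contracts excel_data out) := by unfold Spec_group_multi_unit_contracts; infer_instance

-- ===== CLAIM (what is proved, stated in full; the proofs are below) =====
def Claim_equal_group_multi_unit_contracts : Prop := ∀ (excel_data : List (List (String × String))), Dom_group_multi_unit_contracts excel_data → Spec_group_multi_unit_contracts excel_data (group_multi_unit_contracts excel_data)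

-- ===== LEMMAS AND PROOFS =====

-- "if key not in d: d[key] = []" followed by append(i) is the plain modify-with-default-[]
theorem pv_guard_modify (d : PySem.Dict String (List Int)) (k : String) (f : List Int → List Int) :
    (if d.contains k then d else d.insert k ([] : List Int)).modify k [] f = d.modify k [] f := by
  by_cases h : d.contains k
  · simp [h]
  · simp only [h, Bool.false_eq_true, if_false, PySem.Dict.modify]
    rw [PySem.Dict.getD_insert_self, PySem.Dict.insert_insert_self,
      PySem.Dict.getD_of_not_contains d [] (by simpa using h)]

theorem pv_setdefault_modify (d : PySem.Dict String (List Int)) (k : String) (f : List Int → List Int) :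
    (d.setdefault k ([] : List Int)).modify k [] f = d.modify k [] f := by
  by_cases h : d.contains k
  · rw [PySem.Dict.setdefault_of_contains d _ h]
  · rw [PySem.Dict.setdefault_of_not_contains d _ (by simpa using h)]
    simp only [PySem.Dict.modify]
    rw [PySem.Dict.getD_insert_self, PySem.Dict.insert_insert_self,
      PySem.Dict.getD_of_not_contains d [] (by simpa using h)]

-- pulling a key-test "if P x then step else skip" out of a foldl
theorem pv_foldl_ite {α β : Type} (P : α → Prop) [DecidablePred P] (f : β → α → β) :
    ∀ (l : List α) (r : β),
      l.foldl (fun r q => if P q then f r q else r) r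
        = (l.filter (fun q => decide (P q))).foldl f r := by
  intro l
  induction l with
  | nil => intro r; rfl
  | cons x xs ih =>
    intro r
    by_cases h : P x <;> simp [h, ih]

-- dedup commutes with filter
theorem pv_ofList_filter {α : Type} [BEq α] [LawfulBEq α] (p : α → Bool) (xs : List α) :
    PySem.Set.ofList (xs.filter p) = (PySem.Set.ofList xs).filter p := by
  induction xs using List.reverseRecOn with
  | nil => rfl
  | append_singleton xs x ih =>
    rw [List.filter_append, PySem.Set.ofList_append_singleton]
    by_cases hp : p x
    · simp only [List.filter_cons, hp, if_true, List.filter_nil,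
        PySem.Set.ofList_append_singleton, ih]
      rw [PySem.Set.add_eq_ite, PySem.Set.add_eq_ite]
      by_cases hm : x ∈ PySem.Set.ofList xs
      · simp [hm, List.mem_filter, hp]
      · simp [hm, List.mem_filter, List.filter_append, hp]
    · simp only [List.filter_cons, hp, List.filter_nil]
      rw [PySem.Set.add_eq_ite]
      by_cases hm : x ∈ PySem.Set.ofList xs
      · simp [hm, ih]
      · simp [hm, List.filter_append, hp, ih]

-- the keys of every row, in row order
def pvKeys (excel_data : List (List (String × String))) : List String := excel_data.map pvKey

-- the (key, index) pairs, in row order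
def pvPairs (excel_data : List (List (String × String))) : List (String × Int) :=
  (PySem.List.enumerate excel_data).map (fun p => (pvKey p.2, p.1))

theorem pv_pairs_fst (ed : List (List (String × String))) :
    (pvPairs ed).map (fun q => q.1) = pvKeys ed := by
  simp only [pvPairs, pvKeys, List.map_map]
  have : ((fun q : String × Int => q.1) ∘ fun p : Int × List (String × String) => (pvKey p.2, p.1))
      = pvKey ∘ (fun p : Int × List (String × String) => p.2) := rfl
  rw [this, ← List.map_map, PySem.List.map_snd_enumerate]

-- indices carrying key k, among a pair list
def pvIdx (l : List (String × Int)) (k : String) : List Int :=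
  (l.filter (fun q => q.1 == k)).map (fun q => q.2)

theorem pv_idx_length (ed : List (List (String × String))) (k : String) :
    (pvIdx (pvPairs ed) k).length = (pvKeys ed).count k := by
  rw [← pv_pairs_fst ed, pvIdx, List.length_map, ← List.countP_eq_length_filter,
    List.count, List.countP_map]
  rfl

-- the common normal form both ports reduce to
theorem pv_A_normal (ed : List (List (String × String))) :
    group_multi_unit_contracts ed =
      ((PySem.Set.ofList (pvKeys ed)).filter (fun k => 1 < (pvKeys ed).count k)).map
        (fun k => (k, pvIdx (pvPairs ed) k)) := by
  unfold group_multi_unit_contracts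
  dsimp only
  rw [PySem.List.foldl_congr_mem' _ _
    (fun d p => d.modify (pvKey p.2) [] (fun v => v ++ [p.1])) _
    (fun p _ d => pv_guard_modify d (pvKey p.2) _)]
  have hfoldA : (PySem.List.enumerate ed).foldl
      (fun d p => d.modify (pvKey p.2) [] (fun v => v ++ [p.1])) PySem.Dict.empty
      = (pvPairs ed).foldl
      (fun d (q : String × Int) => d.modify q.1 [] (fun v => v ++ [q.2])) PySem.Dict.empty := by
    rw [pvPairs, List.foldl_map]
  rw [hfoldA]
  have hnd : ((pvPairs ed).foldl
      (fun d (q : String × Int) => d.modify q.1 [] (fun v => v ++ [q.2]))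
      PySem.Dict.empty).keys.Nodup := by
    exact PySem.Dict.nodup_keys_foldl_modify_key _ (fun q : String × Int => q.1) [] (fun _ q v => v ++ [q.2]) _
      (by simp [PySem.Dict.keys_empty])
  rw [PySem.Dict.items_eq_map_keys _ hnd []]
  have hkeys : ((pvPairs ed).foldl
      (fun d (q : String × Int) => d.modify q.1 [] (fun v => v ++ [q.2]))
      PySem.Dict.empty).keys = PySem.Set.ofList (pvKeys ed) := by
    have h := PySem.Dict.keys_foldl_modify_key (pvPairs ed) (fun q : String × Int => q.1)
      ([] : List Int) (fun _ q v => v ++ [q.2]) PySem.Dict.empty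
    rw [PySem.Dict.keys_empty, PySem.Set.update_nil_left, pv_pairs_fst] at h
    exact h
  rw [hkeys, List.filter_map]
  have hgetD : ∀ k, ((pvPairs ed).foldl
      (fun d (q : String × Int) => d.modify q.1 [] (fun v => v ++ [q.2]))
      PySem.Dict.empty).getD k [] = pvIdx (pvPairs ed) k := by
    intro k
    rw [PySem.Dict.getD_foldl_modify_append, PySem.Dict.getD_empty]
    simp [pvIdx]
  rw [List.filter_congr (q := fun k => decide (1 < (pvKeys ed).count k)) (fun k _ => by
    simp only [Function.comp_apply, hgetD k, pv_idx_length ed k])]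
  apply List.map_congr_left
  intro k _
  simp only [hgetD k]

theorem pv_B_normal (ed : List (List (String × String))) :
    group_multi_unit_contracts_alt ed =
      ((PySem.Set.ofList (pvKeys ed)).filter (fun k => 1 < (pvKeys ed).count k)).map
        (fun k => (k, pvIdx (pvPairs ed) k)) := by
  unfold group_multi_unit_contracts_alt
  dsimp only
  have hcounts : (ed.foldl (fun d row => d.modify (pvKey row) 0 (· + 1)) PySem.Dict.empty)
      = PySem.Dict.counter (pvKeys ed) := by
    rw [PySem.Dict.counter_eq_foldl, pvKeys, List.foldl_map]
  rw [hcounts]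
  rw [PySem.List.foldl_congr_mem' _ _
    (fun r (p : Int × List (String × String)) =>
      if 1 < (pvKeys ed).count (pvKey p.2) then r.modify (pvKey p.2) [] (fun v => v ++ [p.1]) else r)
    _ (by
      intro p _ r
      simp only [PySem.Dict.getD_counter, pv_setdefault_modify]
      by_cases h : 1 < (pvKeys ed).count (pvKey p.2)
      · rw [if_pos (by exact_mod_cast h), if_pos h]
      · rw [if_neg (by exact_mod_cast h), if_neg h])]
  have h1 : (PySem.List.enumerate ed).foldl
      (fun r p => if 1 < (pvKeys ed).count (pvKey p.2)
        then r.modify (pvKey p.2) [] (fun v => v ++ [p.1]) else r) PySem.Dict.empty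
      = ((PySem.List.enumerate ed).filter
          (fun p => decide (1 < (pvKeys ed).count (pvKey p.2)))).foldl
      (fun r p => r.modify (pvKey p.2) [] (fun v => v ++ [p.1])) PySem.Dict.empty :=
    pv_foldl_ite _ _ _ _
  rw [h1]
  have h2 : (((PySem.List.enumerate ed).filter
        (fun p => decide (1 < (pvKeys ed).count (pvKey p.2)))).map
        (fun p : Int × List (String × String) => (pvKey p.2, p.1))).foldl
      (fun r (q : String × Int) => r.modify q.1 [] (fun v => v ++ [q.2])) PySem.Dict.empty
      = ((PySem.List.enumerate ed).filter
          (fun p => decide (1 < (pvKeys ed).count (pvKey p.2)))).foldl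
      (fun r p => r.modify (pvKey p.2) [] (fun v => v ++ [p.1])) PySem.Dict.empty :=
    List.foldl_map
  have h3 : (pvPairs ed).filter (fun q : String × Int => decide (1 < (pvKeys ed).count q.1))
      = ((PySem.List.enumerate ed).filter
          (fun p => decide (1 < (pvKeys ed).count (pvKey p.2)))).map
        (fun p : Int × List (String × String) => (pvKey p.2, p.1)) := by
    rw [pvPairs]; exact List.filter_map
  rw [← h2, ← h3]
  have hnd : (((pvPairs ed).filter (fun q : String × Int => decide (1 < (pvKeys ed).count q.1))).foldl
      (fun r (q : String × Int) => r.modify q.1 [] (fun v => v ++ [q.2]))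
      PySem.Dict.empty).keys.Nodup := by
    exact PySem.Dict.nodup_keys_foldl_modify_key _ (fun q : String × Int => q.1) [] (fun _ q v => v ++ [q.2]) _
      (by simp [PySem.Dict.keys_empty])
  rw [PySem.Dict.items_eq_map_keys _ hnd []]
  have hkeys : (((pvPairs ed).filter (fun q : String × Int => decide (1 < (pvKeys ed).count q.1))).foldl
      (fun r (q : String × Int) => r.modify q.1 [] (fun v => v ++ [q.2]))
      PySem.Dict.empty).keys
      = (PySem.Set.ofList (pvKeys ed)).filter (fun k => 1 < (pvKeys ed).count k) := by
    have h := PySem.Dict.keys_foldl_modify_key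
      ((pvPairs ed).filter (fun q : String × Int => decide (1 < (pvKeys ed).count q.1)))
      (fun q : String × Int => q.1) ([] : List Int) (fun _ q v => v ++ [q.2]) PySem.Dict.empty
    rw [PySem.Dict.keys_empty, PySem.Set.update_nil_left] at h
    rw [h]
    rw [show ((pvPairs ed).filter (fun q : String × Int =>
          decide (1 < (pvKeys ed).count q.1))).map (fun q => q.1)
        = ((pvPairs ed).map (fun q => q.1)).filter (fun k => decide (1 < (pvKeys ed).count k)) from
      (List.filter_map (f := fun q : String × Int => q.1)
        (p := fun k => decide (1 < (pvKeys ed).count k)) (l := pvPairs ed)).symm]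
    rw [pv_pairs_fst, pv_ofList_filter]
  rw [hkeys]
  apply List.map_congr_left
  intro k hk
  have hpk : 1 < (pvKeys ed).count k := by
    simp only [List.mem_filter, decide_eq_true_eq] at hk
    exact hk.2
  congr 1
  rw [PySem.Dict.getD_foldl_modify_append, PySem.Dict.getD_empty, List.nil_append,
    List.filter_filter, pvIdx]
  congr 1
  apply List.filter_congr
  intro q _
  by_cases hq : q.1 = k
  · simp [hq, hpk]
  · simp [hq]

-- ===== VERDICT (by name: the statement is the Claim_ definition above) =====
theorem group_multi_unit_contracts_spec : Claim_equal_group_multi_unit_contracts := by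
  intro ed _
  unfold Spec_group_multi_unit_contracts
  rw [pv_A_normal, pv_B_normal]
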